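-- pv_equiv track=rewrite | github.com/hackingmath/challenges | LeetCode/long_long.py | reverse_nums
-- ===== SOURCE A (Python) =====
-- def reverse_nums(nums):
--     start = 0
--     end = len(nums)-1
--     times = 0
--     while any([n < 0 for n in nums]):
--         while end > start and nums[start] >= 0:
--             start += 1
--         while nums[end] >= 0:
--             end -=1
--         negative_part = [-1*n for n in nums[start:end+1]]
--         newnums = nums[:start]+negative_part+nums[end+1:]
--         times += 1
--         nums = newnums[::]
--     return sum(nums),times
-- ===== SOURCE B (Python) =====
-- def reverse_nums(nums):
--     total = 0
--     times = 0
--     neg = False  # sign of the last nonzero element seen so far (True = negative)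
--     for x in nums:
--         if x < 0:
--             total -= x
--             if not neg:
--                 times += 1
--             neg = True
--         elif x > 0:
--             total += x
--             neg = False
--     return total, times
-- ===== Notes on version B (the rewrite author's own statement) =====
-- stated objective: faster
-- what changed: Replaced the repeated flip-the-negative-span simulation (rescanning and rebuilding the list each pass) by a single left-to-right pass that sums absolute values and counts maximal negative blocks, where zeros do not break a block (the sign of the last nonzero element is the only state the simulation's pass count depends on).
import Mathlib
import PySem

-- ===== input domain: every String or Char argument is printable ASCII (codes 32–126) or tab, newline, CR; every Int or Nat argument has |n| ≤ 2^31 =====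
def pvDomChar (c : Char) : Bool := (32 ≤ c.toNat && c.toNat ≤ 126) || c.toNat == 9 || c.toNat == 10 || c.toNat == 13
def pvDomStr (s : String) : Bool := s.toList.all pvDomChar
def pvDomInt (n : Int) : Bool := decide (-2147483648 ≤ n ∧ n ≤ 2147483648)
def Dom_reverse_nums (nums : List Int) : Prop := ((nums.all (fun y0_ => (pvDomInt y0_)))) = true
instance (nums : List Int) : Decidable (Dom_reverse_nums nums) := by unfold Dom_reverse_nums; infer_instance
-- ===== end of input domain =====

-- B replaces A's repeated flip-the-negative-span passes by one linear pass (sum of |x|,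
-- and the pass count = number of maximal negative blocks, zeros not breaking a block).

-- ===== PORT A =====
-- inner loop `while end > start and nums[start] >= 0: start += 1`
-- (the `none` branch is Python's IndexError; it is never reached in A's run)
def pvStartLoopA (nums : List Int) (endI start : Int) : Int :=
  if h : endI > start then
    match PySem.List.pyGet? nums start with
    | some v => if 0 ≤ v then pvStartLoopA nums endI (start + 1) else start
    | none => start
  else start
termination_by (endI - start).toNat
decreasing_by omega

-- inner loop `while nums[end] >= 0: end -= 1`
-- (the `none` branch is Python's IndexError; it is never reached in A's run)
def pvEndLoopA (nums : List Int) (endI : Int) : Int :=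
  match h : PySem.List.pyGet? nums endI with
  | some v => if 0 ≤ v then pvEndLoopA nums (endI - 1) else endI
  | none => endI
termination_by (endI + nums.length + 1).toNat
decreasing_by
  have : ¬ (PySem.List.pyGet? nums endI = none) := by simp [h]
  rw [PySem.List.pyGet?_eq_none_iff] at this
  have := not_not.mp this
  unfold PySem.Raise.InRange at this
  omega

-- outer `while any([n < 0 for n in nums])` loop; the fuel (length + 1) is only a
-- totality guard — it is proved sufficient below, so the fuel-0 branch is unreachable
def pvOuterA (nums : List Int) (start endI times : Int) : Nat → Int × Int
  | 0 => (nums.sum, times)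
  | fuel + 1 =>
    if nums.any (fun n => decide (n < 0)) then
      let s := pvStartLoopA nums endI start
      let e := pvEndLoopA nums endI
      let negative_part := (PySem.List.slice nums (some s) (some (e + 1))).map (fun n => -1 * n)
      let newnums := PySem.List.slice nums none (some s) ++ negative_part ++ PySem.List.slice nums (some (e + 1)) none
      pvOuterA newnums s e (times + 1) fuel
    else (nums.sum, times)

def reverse_nums (nums : List Int) : Int × Int :=
  pvOuterA nums 0 ((nums.length : Int) - 1) 0 (nums.length + 1)

-- ===== PORT B =====
def reverse_nums_alt (nums : List Int) : Int × Int :=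
  let st := nums.foldl (fun (acc : Int × Int × Bool) x =>
    if x < 0 then (acc.1 - x, (if acc.2.2 then acc.2.1 else acc.2.1 + 1), true)
    else if 0 < x then (acc.1 + x, acc.2.1, false)
    else acc) ((0 : Int), (0 : Int), false)
  (st.1, st.2.1)

-- ===== PRECONDITION & SPEC =====
def Spec_reverse_nums (nums : List Int) (out : Int × Int) : Prop := out = reverse_nums_alt nums
instance (nums : List Int) (out : Int × Int) : Decidable (Spec_reverse_nums nums out) := by unfold Spec_reverse_nums; infer_instance

-- ===== CLAIM (what is proved, stated in full; the proofs are below) =====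
def Claim_equal_reverse_nums : Prop := ∀ (nums : List Int), Dom_reverse_nums nums → Spec_reverse_nums nums (reverse_nums nums)

-- ===== LEMMAS AND PROOFS =====

-- sign-machine: state = "last nonzero element seen was negative"
def pvStep (b : Bool) (x : Int) : Bool := if x < 0 then true else if 0 < x then false else b
def pvCnt (b : Bool) : List Int → Int
  | [] => 0
  | x :: xs => (if x < 0 ∧ b = false then 1 else 0) + pvCnt (pvStep b x) xs
def pvState (b : Bool) (xs : List Int) : Bool := xs.foldl pvStep b
def pvAbsSum (xs : List Int) : Int := (xs.map (fun x => |x|)).sum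

-- the mirror machine: what pvCnt does on the negated list
def pvMStep (b : Bool) (x : Int) : Bool := if 0 < x then true else if x < 0 then false else b
def pvMCnt (b : Bool) : List Int → Int
  | [] => 0
  | x :: xs => (if 0 < x ∧ b = false then 1 else 0) + pvMCnt (pvMStep b x) xs

theorem pvCnt_nonneg (b : Bool) (xs : List Int) : 0 ≤ pvCnt b xs := by
  induction xs generalizing b with
  | nil => simp [pvCnt]
  | cons x t ih => simp only [pvCnt]; have := ih (pvStep b x); split_ifs <;> omega

theorem pvCnt_le_length (b : Bool) (xs : List Int) : pvCnt b xs ≤ (xs.length : Int) := by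
  induction xs generalizing b with
  | nil => simp [pvCnt]
  | cons x t ih =>
    simp only [pvCnt, List.length_cons]
    have := ih (pvStep b x); split_ifs <;> push_cast <;> omega

theorem pvCnt_append (b : Bool) (xs ys : List Int) :
    pvCnt b (xs ++ ys) = pvCnt b xs + pvCnt (pvState b xs) ys := by
  induction xs generalizing b with
  | nil => simp [pvCnt, pvState]
  | cons x t ih => simp only [List.cons_append, pvCnt, pvState, List.foldl_cons] at *; rw [ih]; ring

theorem pvCnt_of_nonneg (b : Bool) (xs : List Int) (h : ∀ x ∈ xs, 0 ≤ x) : pvCnt b xs = 0 := by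
  induction xs generalizing b with
  | nil => simp [pvCnt]
  | cons x t ih =>
    have hx := h x (by simp)
    simp only [pvCnt]
    rw [ih _ (fun y hy => h y (by simp [hy]))]
    have : ¬ (x < 0 ∧ b = false) := by rintro ⟨h1, _⟩; omega
    simp [this]

theorem pvState_false_of_nonneg (xs : List Int) (h : ∀ x ∈ xs, 0 ≤ x) :
    pvState false xs = false := by
  induction xs with
  | nil => simp [pvState]
  | cons x t ih =>
    have hx := h x (by simp)
    have hstep : pvStep false x = false := by unfold pvStep; split_ifs <;> simp_all <;> omega
    simp only [pvState, List.foldl_cons, hstep]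
    exact ih (fun y hy => h y (by simp [hy]))

theorem pvState_of_last_pos (xs : List Int) (z : Int) (hz : xs.getLast? = some z) (hpos : 0 < z)
    (b : Bool) : pvState b xs = false := by
  induction xs generalizing b with
  | nil => simp at hz
  | cons x t ih =>
    cases t with
    | nil =>
      simp [List.getLast?] at hz
      rw [← hz] at hpos
      have h1 : ¬ x < 0 := by omega
      simp [pvState, pvStep, h1, hpos]
    | cons y u =>
      rw [List.getLast?_cons_cons] at hz
      simp only [pvState, List.foldl_cons]
      exact ih hz _

theorem pvCnt_map_neg (b : Bool) (xs : List Int) :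
    pvCnt b (xs.map (fun n => -1 * n)) = pvMCnt b xs := by
  induction xs generalizing b with
  | nil => simp [pvCnt, pvMCnt]
  | cons x t ih =>
    simp only [List.map_cons, pvCnt, pvMCnt]
    have hstep : pvStep b (-1 * x) = pvMStep b x := by
      unfold pvStep pvMStep; split_ifs <;> first | rfl | omega
    have hcond : ((-1 * x < 0 ∧ b = false) ↔ (0 < x ∧ b = false)) := by constructor <;> rintro ⟨h1, h2⟩ <;> exact ⟨by omega, h2⟩
    rw [hstep, ih]
    congr 1
    simp only [hcond]

-- the key simulation: on a list ending in a negative, the mirror machine counts one less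
theorem pvMCnt_sim (xs : List Int) :
    ((xs = [] ∨ ∃ z, xs.getLast? = some z ∧ z < 0) → pvMCnt false xs = pvCnt true xs) ∧
    ((∃ z, xs.getLast? = some z ∧ z < 0) → pvMCnt true xs = pvCnt false xs - 1) := by
  induction xs with
  | nil =>
    constructor
    · intro _; simp [pvMCnt, pvCnt]
    · rintro ⟨z, hz, _⟩; simp at hz
  | cons x t ih =>
    have hlast : ∀ z : Int, (x :: t).getLast? = some z → (t = [] ∧ z = x) ∨ t.getLast? = some z := by
      intro z hz
      cases t with
      | nil => left; simp [List.getLast?] at hz; simp [hz]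
      | cons y u => right; rwa [List.getLast?_cons_cons] at hz
    constructor
    · rintro (h | ⟨z, hz, hzneg⟩)
      · exact absurd h (by simp)
      rcases hlast z hz with ⟨ht, hzx⟩ | hzt
      · -- t = [], x < 0
        subst ht; rw [hzx] at hzneg
        have h1 : ¬ 0 < x := by omega
        simp [pvMCnt, pvCnt, pvStep, h1, hzneg]
      · -- t ends in a negative
        simp only [pvMCnt, pvCnt]
        rcases lt_trichotomy x 0 with hx | hx | hx
        · have h1 : ¬ 0 < x := by omega
          have hms : pvMStep false x = false := by simp [pvMStep, h1, hx]
          have hs : pvStep true x = true := by simp [pvStep, hx]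
          rw [hms, hs, (ih).1 (Or.inr ⟨z, hzt, hzneg⟩)]
          simp [h1, hx]
        · subst hx
          have hms : pvMStep false 0 = false := by simp [pvMStep]
          have hs : pvStep true 0 = true := by simp [pvStep]
          rw [hms, hs, (ih).1 (Or.inr ⟨z, hzt, hzneg⟩)]
          simp
        · have h1 : ¬ x < 0 := by omega
          have hms : pvMStep false x = true := by simp [pvMStep, hx]
          have hs : pvStep true x = false := by simp [pvStep, h1, hx]
          rw [hms, hs, (ih).2 ⟨z, hzt, hzneg⟩]
          simp [h1, hx]
    · rintro ⟨z, hz, hzneg⟩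
      rcases hlast z hz with ⟨ht, hzx⟩ | hzt
      · subst ht; rw [hzx] at hzneg
        have h1 : ¬ 0 < x := by omega
        simp [pvMCnt, pvCnt, pvMStep, pvStep, h1, hzneg]
      · simp only [pvMCnt, pvCnt]
        rcases lt_trichotomy x 0 with hx | hx | hx
        · have h1 : ¬ 0 < x := by omega
          have hms : pvMStep true x = false := by simp [pvMStep, h1, hx]
          have hs : pvStep false x = true := by simp [pvStep, hx]
          rw [hms, hs, (ih).1 (Or.inr ⟨z, hzt, hzneg⟩)]
          simp [h1, hx]
        · subst hx
          have hms : pvMStep true 0 = true := by simp [pvMStep]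
          have hs : pvStep false 0 = false := by simp [pvStep]
          rw [hms, hs, (ih).2 ⟨z, hzt, hzneg⟩]
          simp
        · have h1 : ¬ x < 0 := by omega
          have hms : pvMStep true x = true := by simp [pvMStep, hx]
          have hs : pvStep false x = false := by simp [pvStep, h1, hx]
          rw [hms, hs, (ih).2 ⟨z, hzt, hzneg⟩]
          simp [h1, hx]

theorem pvSum_of_nonneg (xs : List Int) (h : ∀ x ∈ xs, 0 ≤ x) : xs.sum = pvAbsSum xs := by
  induction xs with
  | nil => simp [pvAbsSum]
  | cons x t ih =>
    simp only [List.sum_cons, pvAbsSum, List.map_cons] at *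
    rw [ih (fun y hy => h y (by simp [hy])), abs_of_nonneg (h x (by simp))]

theorem pvAbsSum_append (xs ys : List Int) : pvAbsSum (xs ++ ys) = pvAbsSum xs + pvAbsSum ys := by
  simp [pvAbsSum]

theorem pvAbsSum_map_neg (xs : List Int) : pvAbsSum (xs.map (fun n => -1 * n)) = pvAbsSum xs := by
  unfold pvAbsSum
  rw [List.map_map]
  congr 1
  apply List.map_congr_left
  intro x _
  simp

-- B's fold computes (Σ|x|, pvCnt) with state pvState
theorem pvAltFold (xs : List Int) (t c : Int) (b : Bool) :
    xs.foldl (fun (acc : Int × Int × Bool) x =>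
      if x < 0 then (acc.1 - x, (if acc.2.2 then acc.2.1 else acc.2.1 + 1), true)
      else if 0 < x then (acc.1 + x, acc.2.1, false)
      else acc) (t, c, b) = (t + pvAbsSum xs, c + pvCnt b xs, pvState b xs) := by
  induction xs generalizing t c b with
  | nil => simp [pvAbsSum, pvCnt, pvState]
  | cons x u ih =>
    simp only [List.foldl_cons]
    rcases lt_trichotomy x 0 with hx | hx | hx
    · have h1 : ¬ 0 < x := by omega
      cases b with
      | false =>
        simp only [hx, if_true, ih]
        simp [pvAbsSum, pvCnt, pvState, pvStep, hx, abs_of_neg hx]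
        constructor; · ring
        ring
      | true =>
        simp only [hx, if_true, ih]
        simp [pvAbsSum, pvCnt, pvState, pvStep, hx, abs_of_neg hx]
        ring
    · subst hx
      simp only [lt_irrefl, if_false, ih]
      simp [pvAbsSum, pvCnt, pvState, pvStep]
    · have h1 : ¬ x < 0 := by omega
      simp only [h1, if_false, hx, if_true, ih]
      simp [pvAbsSum, pvCnt, pvState, pvStep, h1, hx, abs_of_pos hx]
      ring

theorem pvAlt_eq (nums : List Int) : reverse_nums_alt nums = (pvAbsSum nums, pvCnt false nums) := by
  unfold reverse_nums_alt
  rw [pvAltFold]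
  simp

-- first negative element
theorem pvFirstNeg (xs : List Int) (hx : ∃ x ∈ xs, x < 0) :
    ∃ j : Nat, ∃ h : j < xs.length, xs[j] < 0 ∧
      ∀ i : Nat, i < j → ∀ hi : i < xs.length, 0 ≤ xs[i] := by
  induction xs with
  | nil => simp at hx
  | cons x t ih =>
    by_cases hxneg : x < 0
    · exact ⟨0, by simp, by simpa, fun i hi _ => absurd hi (by omega)⟩
    · obtain ⟨y, hy, hyneg⟩ := hx
      rcases List.mem_cons.mp hy with rfl | hyt
      · omega
      obtain ⟨j, hj, hneg, hmin⟩ := ih ⟨y, hyt, hyneg⟩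
      refine ⟨j + 1, by simpa using Nat.succ_lt_succ hj, by simpa using hneg, ?_⟩
      intro i hi hilen
      cases i with
      | zero => simpa using (by omega : (0:Int) ≤ x)
      | succ k => simpa using hmin k (by omega) (by simpa using Nat.lt_of_succ_lt_succ hilen)

-- last negative element
theorem pvLastNeg (xs : List Int) (hx : ∃ x ∈ xs, x < 0) :
    ∃ j : Nat, ∃ h : j < xs.length, xs[j] < 0 ∧
      ∀ i : Nat, j < i → ∀ hi : i < xs.length, 0 ≤ xs[i] := by
  induction xs with
  | nil => simp at hx
  | cons x t ih =>
    by_cases hxt : ∃ y ∈ t, y < 0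
    · obtain ⟨j, hj, hneg, hmax⟩ := ih hxt
      refine ⟨j + 1, by simpa using Nat.succ_lt_succ hj, by simpa using hneg, ?_⟩
      intro i hi hilen
      cases i with
      | zero => omega
      | succ k => simpa using hmax k (by omega) (by simpa using Nat.lt_of_succ_lt_succ hilen)
    · push_neg at hxt
      have hxneg : x < 0 := by
        obtain ⟨y, hy, hyneg⟩ := hx
        rcases List.mem_cons.mp hy with rfl | hyt
        · exact hyneg
        · exact absurd hyneg (by simpa using hxt y hyt)
      refine ⟨0, by simp, by simpa, ?_⟩
      intro i hi hilen
      cases i with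
      | zero => omega
      | succ k => simpa using hxt _ (by simp)

-- characterization of A's start loop: it lands on the first negative index
theorem pvStartLoopA_eq (nums : List Int) (endI : Int) (j : Nat) (hj : j < nums.length)
    (hneg : nums[j] < 0) (hje : (j : Int) ≤ endI) :
    ∀ k : Nat, ∀ start : Int, start = (j : Int) - k → 0 ≤ start →
      (∀ i : Nat, i < j → ∀ hi : i < nums.length, 0 ≤ nums[i]) →
      pvStartLoopA nums endI start = j := by
  intro k
  induction k with
  | zero =>
    intro start hstart _ _
    simp only [Nat.cast_zero, sub_zero] at hstart; subst hstart
    rw [pvStartLoopA]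
    split
    · rw [PySem.List.pyGet?_natCast, List.getElem?_eq_getElem hj]
      simp only
      have : ¬ 0 ≤ nums[j] := by omega
      simp [this]
    · rfl
  | succ k ih =>
    intro start hstart hpos hmin
    have hlt : start < (j : Int) := by push_cast at hstart ⊢; omega
    rw [pvStartLoopA]
    have hcond : endI > start := by omega
    rw [dif_pos hcond]
    have hsn : start.toNat < j := by omega
    rw [PySem.List.pyGet?_eq_some_getElem nums hpos (by push_cast; omega)]
    simp only
    rw [if_pos (hmin start.toNat hsn (by omega))]
    exact ih (start + 1) (by push_cast at hstart ⊢; omega) (by omega) hmin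

theorem pvEndLoopA_unfold (nums : List Int) (endI : Int) (v : Int)
    (h : PySem.List.pyGet? nums endI = some v) :
    pvEndLoopA nums endI = if 0 ≤ v then pvEndLoopA nums (endI - 1) else endI := by
  rw [pvEndLoopA]
  split
  · next v' heq => rw [Option.some.inj (h.symm.trans heq)]
  · next heq => rw [h] at heq; exact absurd heq (by simp)

-- characterization of A's end loop: it lands on the last negative index
theorem pvEndLoopA_eq (nums : List Int) (j : Nat) (hj : j < nums.length) (hneg : nums[j] < 0)
    (hmax : ∀ i : Nat, j < i → ∀ hi : i < nums.length, 0 ≤ nums[i]) :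
    ∀ k : Nat, ∀ endI : Int, endI = (j : Int) + k → endI < (nums.length : Int) →
      pvEndLoopA nums endI = j := by
  intro k
  induction k with
  | zero =>
    intro endI hendI _
    simp only [Nat.cast_zero, add_zero] at hendI; subst hendI
    have hsome := PySem.List.pyGet?_eq_some_getElem nums (show (0:Int) ≤ (j:Int) by omega) (by push_cast; omega)
    rw [pvEndLoopA_unfold nums _ _ hsome,
      if_neg (show ¬ (0:Int) ≤ nums[((j:Int)).toNat]'(by simpa using hj) from by
        simp only [Int.toNat_natCast]; omega)]
  | succ k ih =>
    intro endI hendI hlen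
    have hgt : (j : Int) < endI := by push_cast at hendI; omega
    have hin : endI.toNat < nums.length := by omega
    have hsome := PySem.List.pyGet?_eq_some_getElem nums (show (0:Int) ≤ endI by omega) (by push_cast; omega)
    rw [pvEndLoopA_unfold nums _ _ hsome, if_pos (hmax endI.toNat (by omega) hin)]
    exact ih (endI - 1) (by push_cast at hendI ⊢; omega) (by omega)

theorem pvTakeNonneg (xs : List Int) (k : Nat) (h : ∀ i : Nat, i < k → ∀ hi : i < xs.length, 0 ≤ xs[i]) :
    ∀ x ∈ xs.take k, 0 ≤ x := by
  intro x hx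
  obtain ⟨i, hi, rfl⟩ := List.getElem_of_mem hx
  rw [List.getElem_take]
  exact h i (by simp at hi; omega) _

theorem pvDropNonneg (xs : List Int) (k : Nat) (h : ∀ i : Nat, k ≤ i → ∀ hi : i < xs.length, 0 ≤ xs[i]) :
    ∀ x ∈ xs.drop k, 0 ≤ x := by
  intro x hx
  obtain ⟨i, hi, rfl⟩ := List.getElem_of_mem hx
  rw [List.getElem_drop]
  exact h (k + i) (by omega) _

-- the main loop invariant: prefix before `start` and suffix after `endI` are nonnegative;
-- then A's loop returns (Σ|x|, times + number of zero-merged negative runs)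
theorem pvOuterA_eq : ∀ (fuel : Nat) (nums : List Int) (start endI times : Int),
    0 ≤ start →
    endI < (nums.length : Int) →
    (∀ i : Nat, ∀ hi : i < nums.length, (i : Int) < start → 0 ≤ nums[i]) →
    (∀ i : Nat, ∀ hi : i < nums.length, endI < (i : Int) → 0 ≤ nums[i]) →
    pvCnt false nums < fuel →
    pvOuterA nums start endI times fuel = (pvAbsSum nums, times + pvCnt false nums) := by
  intro fuel
  induction fuel with
  | zero => intro nums start endI times _ _ _ _ hf; have := pvCnt_nonneg false nums; omega
  | succ fuel ih =>
    intro nums start endI times hstart hendI hpre hsuf hf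
    by_cases hany : ∃ x ∈ nums, x < 0
    · obtain ⟨j, hj, hjneg, hjmin⟩ := pvFirstNeg nums hany
      obtain ⟨j', hj', hj'neg, hj'max⟩ := pvLastNeg nums hany
      have hjj' : j ≤ j' := by
        by_contra hc
        exact absurd hj'neg (by have := hjmin j' (by omega) hj'; omega)
      have hstartj : start ≤ (j : Int) := by
        by_contra hc
        exact absurd hjneg (by have := hpre j hj (by omega); omega)
      have hj'endI : (j' : Int) ≤ endI := by
        by_contra hc
        exact absurd hj'neg (by have := hsuf j' hj' (by omega); omega)
      have hanyB : nums.any (fun n => decide (n < 0)) = true := by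
        simp only [List.any_eq_true, decide_eq_true_eq]; exact hany
      rw [pvOuterA, if_pos hanyB]
      have hS : pvStartLoopA nums endI start = j :=
        pvStartLoopA_eq nums endI j hj hjneg (by omega)
          ((j : Int) - start).toNat start
          (by omega) hstart hjmin
      have hE : pvEndLoopA nums endI = j' :=
        pvEndLoopA_eq nums j' hj' hj'neg hj'max (endI - (j' : Int)).toNat endI (by omega) hendI
      simp only [hS, hE]
      -- the three pieces
      have hsliceM : PySem.List.slice nums (some (j : Int)) (some ((j' : Int) + 1)) =
          (nums.drop j).take (j' + 1 - j) := by
        have : ((j' : Int) + 1) = ((j' + 1 : Nat) : Int) := by push_cast; ring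
        rw [this, PySem.List.slice_natCast]
      have hsliceP : PySem.List.slice nums none (some (j : Int)) = nums.take j :=
        PySem.List.slice_to_natCast nums j
      have hsliceS : PySem.List.slice nums (some ((j' : Int) + 1)) none = nums.drop (j' + 1) := by
        have : ((j' : Int) + 1) = ((j' + 1 : Nat) : Int) := by push_cast; ring
        rw [this, PySem.List.slice_from_natCast]
      rw [hsliceM, hsliceP, hsliceS]
      set P := nums.take j with hP
      set M := (nums.drop j).take (j' + 1 - j) with hM
      set S := nums.drop (j' + 1) with hSdef
      have hMS : M ++ S = nums.drop j := by
        have hdd : S = List.drop (j' + 1 - j) (List.drop j nums) := by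
          rw [hSdef, List.drop_drop]
          congr 1
          omega
        rw [hM, hdd, List.take_append_drop]
      have hsplit : nums = P ++ (M ++ S) := by rw [hMS, hP, List.take_append_drop]
      have hPlen : P.length = j := by rw [hP, List.length_take]; omega
      have hMlen : M.length = j' + 1 - j := by
        rw [hM, List.length_take, List.length_drop]; omega
      have hPnonneg : ∀ x ∈ P, 0 ≤ x := pvTakeNonneg nums j (fun i hik hi => hjmin i hik hi)
      have hSnonneg : ∀ x ∈ S, 0 ≤ x :=
        pvDropNonneg nums (j' + 1) (fun i hik hi => hj'max i (by omega) hi)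
      have hMhead : M.head? = some nums[j] := by
        rw [hM, List.head?_take]
        rw [if_neg (show ¬ (j' + 1 - j = 0) by omega), List.head?_drop,
          List.getElem?_eq_getElem hj]
      have hMlast : M.getLast? = some nums[j'] := by
        rw [List.getLast?_eq_getElem?, hMlen]
        have hidx : j' + 1 - j - 1 = j' - j := by omega
        rw [hidx, hM, List.getElem?_take]
        rw [if_pos (show j' - j < j' + 1 - j by omega), List.getElem?_drop]
        have : j + (j' - j) = j' := by omega
        rw [this, List.getElem?_eq_getElem hj']
      -- counts
      have hcntNums : pvCnt false nums = pvCnt false M := by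
        conv_lhs => rw [hsplit]
        rw [pvCnt_append, pvCnt_of_nonneg _ _ hPnonneg, pvState_false_of_nonneg _ hPnonneg,
          pvCnt_append, pvCnt_of_nonneg _ _ hSnonneg]
        ring
      set M' := M.map (fun n => -1 * n) with hM'
      have hM'last : M'.getLast? = some (-1 * nums[j']) := by
        rw [hM', List.getLast?_map, hMlast]; rfl
      have hcntM' : pvCnt false M' = pvCnt false M - 1 := by
        rw [hM', pvCnt_map_neg]
        obtain ⟨x, t, hxt⟩ : ∃ x t, M = x :: t := by
          cases hMc : M with
          | nil => rw [hMc] at hMlen; simp at hMlen; omega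
          | cons x t => exact ⟨x, t, rfl⟩
        have hxneg : x < 0 := by
          have := hMhead; rw [hxt] at this; simp at this; omega
        have hlast : ∃ z, M.getLast? = some z ∧ z < 0 := ⟨nums[j'], hMlast, hj'neg⟩
        rw [(pvMCnt_sim M).1 (Or.inr hlast)]
        rw [hxt]
        simp only [pvCnt, pvStep, if_pos hxneg, Bool.true_eq_false, and_false, if_false,
          and_true, eq_self_iff_true]
        ring
      have hM'len : M'.length = M.length := by rw [hM', List.length_map]
      have hSlen : S.length = nums.length - (j' + 1) := by rw [hSdef, List.length_drop]
      set L := P ++ M' ++ S with hL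
      have hLlen : L.length = nums.length := by
        rw [hL]
        conv_rhs => rw [hsplit]
        simp only [List.length_append]
        omega
      have hcntL : pvCnt false L = pvCnt false nums - 1 := by
        rw [hL, List.append_assoc, pvCnt_append, pvCnt_of_nonneg _ _ hPnonneg,
          pvState_false_of_nonneg _ hPnonneg, pvCnt_append, hcntM',
          pvState_of_last_pos M' _ hM'last (by omega), pvCnt_of_nonneg _ _ hSnonneg, hcntNums]
        ring
      have habsL : pvAbsSum L = pvAbsSum nums := by
        rw [hL, List.append_assoc, pvAbsSum_append, pvAbsSum_append, hM', pvAbsSum_map_neg]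
        conv_rhs => rw [hsplit]
        rw [pvAbsSum_append, pvAbsSum_append]
      -- new invariants
      have hgetP : ∀ i : Nat, ∀ hi : i < L.length, (i : Int) < (j : Int) → 0 ≤ L[i] := by
        intro i hi hij
        have hiP : i < P.length := by omega
        have e : L[i]? = P[i]? := by
          rw [hL, List.append_assoc]
          exact List.getElem?_append_left hiP
        rw [List.getElem?_eq_getElem hi, List.getElem?_eq_getElem hiP] at e
        rw [Option.some.inj e]
        exact hPnonneg _ (List.getElem_mem _)
      have hgetS : ∀ i : Nat, ∀ hi : i < L.length, (j' : Int) < (i : Int) → 0 ≤ L[i] := by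
        intro i hi hij
        have hPM'len : (P ++ M').length = j' + 1 := by
          simp only [List.length_append]
          omega
        have hle : (P ++ M').length ≤ i := by omega
        have e : L[i]? = S[i - (P ++ M').length]? := by
          rw [hL]
          exact List.getElem?_append_right hle
        have hiS : i - (P ++ M').length < S.length := by omega
        rw [List.getElem?_eq_getElem hi, List.getElem?_eq_getElem hiS] at e
        rw [Option.some.inj e]
        exact hSnonneg _ (List.getElem_mem _)
      rw [ih L (j : Int) (j' : Int) (times + 1) (by omega)
        (by rw [hLlen]; push_cast; omega) hgetP hgetS (by omega)]
      rw [habsL, hcntL]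
      simp only [Prod.mk.injEq]
      exact ⟨trivial, by ring⟩
    · push_neg at hany
      have hnonneg : ∀ x ∈ nums, 0 ≤ x := fun x hx => by have := hany x hx; omega
      have hanyB : nums.any (fun n => decide (n < 0)) = false := by
        simp only [List.any_eq_false, decide_eq_true_eq]
        intro x hx; have := hnonneg x hx; omega
      rw [pvOuterA, if_neg (by simp [hanyB])]
      rw [pvSum_of_nonneg nums hnonneg, pvCnt_of_nonneg false nums hnonneg]
      simp

-- ===== VERDICT (by name: the statement is the Claim_ definition above) =====
theorem reverse_nums_spec : Claim_equal_reverse_nums := by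
  intro nums _
  unfold Spec_reverse_nums
  rw [pvAlt_eq]
  unfold reverse_nums
  rw [pvOuterA_eq (nums.length + 1) nums 0 ((nums.length : Int) - 1) 0 (by omega)
    (by push_cast; omega)
    (fun i hi h => by omega)
    (fun i hi h => by push_cast at h; omega)
    (by have := pvCnt_le_length false nums; push_cast; omega)]
  simp
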